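-- pv_equiv track=rewrite | github.com/chendingyan/My-Leetcode | leetcode/editor/cn/[651]4键键盘.py | maxA2
-- ===== SOURCE A (Python) =====
-- def maxA2(N):
--     dp = [0] * N
--     dp[0] = 1
--     for i in range(1, N):
--         dp[i] = dp[i - 1] + 1
--         for j in range(3, i + 1):
--             max_value = dp[j - 3] * (i - j + 2)
--             dp[i] = max(dp[i], max_value)
--     return dp[N - 1]
-- ===== SOURCE B (Python) =====
-- def maxA2(N):
--     # Rolling window O(N): a multiplier larger than 5 is always dominated
--     # (dp[x+3] >= 2*dp[x]), so only the last few break points matter.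
--     a = b = c = d = e = 0
--     f = 1
--     for _ in range(1, N):
--         cur = max(f + 1, d * 2, c * 3, b * 4, a * 5)
--         a, b, c, d, e, f = b, c, d, e, f, cur
--     return f
-- ===== Notes on version B (the rewrite author's own statement) =====
-- stated objective: faster
-- what changed: Replaced the quadratic DP that scans all break points j for every i by an O(N) rolling window of the last six dp values, using the dominance fact dp[x+3] >= 2*dp[x] which bounds the useful multiplier by 5.
import Mathlib
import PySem

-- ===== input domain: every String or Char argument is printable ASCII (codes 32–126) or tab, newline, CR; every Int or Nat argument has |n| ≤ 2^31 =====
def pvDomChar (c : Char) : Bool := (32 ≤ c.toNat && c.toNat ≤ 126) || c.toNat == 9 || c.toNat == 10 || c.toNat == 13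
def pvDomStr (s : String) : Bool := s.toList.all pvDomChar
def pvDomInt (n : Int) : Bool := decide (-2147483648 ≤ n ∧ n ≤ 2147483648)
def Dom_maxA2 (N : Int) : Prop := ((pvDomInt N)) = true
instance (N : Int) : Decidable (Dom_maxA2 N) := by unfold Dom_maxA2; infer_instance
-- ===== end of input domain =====

-- B replaces A's quadratic all-break-points DP by an O(N) rolling window of the
-- last six dp values (multipliers above 5 are dominated: dp[x+3] >= 2*dp[x]).


-- ===== PORT A =====
-- literal transliteration of A: dp table of length N, outer loop i in range(1,N),
-- inner loop over all break points j in range(3,i+1); list indexing/assignment via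
-- the total PySem forms pyGetD/pySetD (every index is in range under Pre_).
def maxA2 (N : Int) : Int :=
  let dp := List.replicate N.toNat (0 : Int)
  let dp := PySem.List.pySetD dp 0 1
  let dp := (PySem.List.pyRange 1 N 1).foldl
    (fun dp i =>
      let dp := PySem.List.pySetD dp i (PySem.List.pyGetD dp (i - 1) 0 + 1)
      (PySem.List.pyRange 3 (i + 1) 1).foldl
        (fun dp j =>
          let max_value := PySem.List.pyGetD dp (j - 3) 0 * (i - j + 2)
          PySem.List.pySetD dp i (max (PySem.List.pyGetD dp i 0) max_value))
        dp)
    dp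
  PySem.List.pyGetD dp (N - 1) 0

-- one inner loop of A rewrites only position i = l.length; reads below stay in l

-- ===== PORT B =====
-- literal transliteration of Source B: six rolling variables, the loop body ignores the index.
def maxA2_alt (N : Int) : Int :=
  let st : Int × Int × Int × Int × Int × Int :=
    (PySem.List.pyRange 1 N 1).foldl
      (fun s _ =>
        match s with
        | (a, b, c, d, e, f) =>
          let cur := max (max (max (max (f + 1) (d * 2)) (c * 3)) (b * 4)) (a * 5)
          (b, c, d, e, f, cur))
      (0, 0, 0, 0, 0, 1)
  st.2.2.2.2.2

-- ===== PRECONDITION & SPEC =====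
-- Pre_ excludes exactly N <= 0, where the Python A raises IndexError (dp[0] = 1 on the empty list).
def Pre_maxA2 (N : Int) : Prop := 1 ≤ N
instance (N : Int) : Decidable (Pre_maxA2 N) := by unfold Pre_maxA2; infer_instance
def pvWitness_maxA2 : Int := 4

def Spec_maxA2 (N : Int) (out : Int) : Prop := out = maxA2_alt N
instance (N : Int) (out : Int) : Decidable (Spec_maxA2 N out) := by unfold Spec_maxA2; infer_instance

-- ===== CLAIM (what is proved, stated in full; the proofs are below) =====
def Claim_equal_maxA2 : Prop := ∀ (N : Int), Dom_maxA2 N → Pre_maxA2 N → Spec_maxA2 N (maxA2 N)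

-- ===== LEMMAS AND PROOFS =====
-- Shared characterisation: pvF m is the dp value at index m.  pvNewval/pvL/pvF mirror
-- A's inner maximum; the window lemmas (pvF_double, pvCand_le, pvWindow) show that the
-- 5-term window B keeps computes the same maximum; pvA_eq/pvB_eq bridge the two ports.
def pvNewval (l : List Int) : Int :=
  let i : Int := l.length
  (PySem.List.pyRange 3 (i + 1) 1).foldl
    (fun acc j => max acc (PySem.List.pyGetD l (j - 3) 0 * (i - j + 2)))
    (PySem.List.pyGetD l (i - 1) 0 + 1)
def pvL : Nat → List Int
  | 0 => [1]
  | m + 1 => pvL m ++ [pvNewval (pvL m)]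
def pvF (m : Nat) : Int := (pvL m).getD m 0
lemma pvL_length (m : Nat) : (pvL m).length = m + 1 := by
  induction m with
  | zero => rfl
  | succ m ih => simp [pvL, ih]
lemma pvL_getD (m t : Nat) (h : t ≤ m) : (pvL m).getD t 0 = pvF t := by
  induction m with
  | zero => interval_cases t; rfl
  | succ m ih =>
      rcases Nat.lt_or_ge t (m + 1) with h' | h'
      · rw [pvL, List.getD_append _ _ _ _ (by rw [pvL_length]; omega)]
        exact ih (by omega)
      · have ht : t = m + 1 := by omega
        subst ht; rfl

lemma pvF_succ (k : Nat) :
    pvF (k + 1) =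
      (List.range (k - 1)).foldl (fun acc t => max acc (pvF t * ((k : Int) - t))) (pvF k + 1) := by
  have h1 : pvF (k + 1) = pvNewval (pvL k) := by
    unfold pvF
    rw [pvL]
    simp [pvL_length]
  rw [h1]
  unfold pvNewval
  rw [pvL_length]
  dsimp only
  rw [PySem.List.pyRange_one]
  push_cast
  have e : (((k : Nat) + 1 : Int) + 1 - 3).toNat = k - 1 := by omega
  rw [e, List.foldl_map]
  have einit : ((k : Nat) : Int) + 1 - 1 = ((k : Nat) : Int) := by ring
  rw [einit, PySem.List.pyGetD_natCast, pvL_getD k k (le_refl k)]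
  apply PySem.List.foldl_congr_mem
  intro acc t ht
  have ht' : t < k - 1 := List.mem_range.mp ht
  have e1 : (3 : Int) + (t : Int) - 3 = ((t : Nat) : Int) := by ring
  have e2 : ((k : Nat) : Int) + 1 - (3 + (t : Int)) + 2 = (k : Int) - t := by ring
  rw [e1, e2, PySem.List.pyGetD_natCast, pvL_getD k t (by omega)]

lemma pvFoldMax_le {α : Type} (l : List α) (c : α → Int) (B : Int) :
    ∀ a : Int, a ≤ B → (∀ x ∈ l, c x ≤ B) →
      l.foldl (fun acc x => max acc (c x)) a ≤ B := by
  induction l with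
  | nil => intro a ha _; simpa using ha
  | cons x xs ih =>
      intro a ha hx
      exact ih _ (max_le ha (hx x (by simp))) (fun y hy => hx y (by simp [hy]))

lemma pvF_ge_one (n : Nat) : 1 ≤ pvF n := by
  induction n with
  | zero => decide
  | succ n ih =>
      rw [pvF_succ]
      have := (PySem.List.le_foldl_max_int (List.range (n - 1))
        (fun t => pvF t * ((n : Int) - t)) (pvF n + 1)).1
      omega

lemma pvF_succ_ge (n : Nat) : pvF n + 1 ≤ pvF (n + 1) := by
  rw [pvF_succ]
  exact (PySem.List.le_foldl_max_int (List.range (n - 1))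
    (fun t => pvF t * ((n : Int) - t)) (pvF n + 1)).1

lemma pvF_double (n : Nat) : 2 * pvF n ≤ pvF (n + 3) := by
  have h := (PySem.List.le_foldl_max_int (List.range ((n + 2) - 1))
    (fun t => pvF t * (((n + 2 : Nat) : Int) - t)) (pvF (n + 2) + 1)).2 n (by simp)
  rw [show n + 3 = (n + 2) + 1 from rfl, pvF_succ]
  have e : ((n + 2 : Nat) : Int) - (n : Nat) = 2 := by push_cast; ring
  rw [e] at h
  linarith

def pvW (k d : Nat) : Int := if d ≤ k then pvF (k - d) else 0

def pvWin (k : Nat) : Int :=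
  max (max (max (max (pvF k + 1) (pvW k 2 * 2)) (pvW k 3 * 3)) (pvW k 4 * 4)) (pvW k 5 * 5)

lemma pvWin_ge_w (k m : Nat) (h2 : 2 ≤ m) (h5 : m ≤ 5) : pvW k m * m ≤ pvWin k := by
  unfold pvWin
  interval_cases m
  · exact le_max_of_le_left (le_max_of_le_left (le_max_of_le_left (le_max_right _ _)))
  · exact le_max_of_le_left (le_max_of_le_left (le_max_right _ _))
  · exact le_max_of_le_left (le_max_right _ _)
  · exact le_max_right _ _

lemma pvCand_le (k : Nat) : ∀ mm t, t < k - 1 → k - t = mm → pvF t * ((k : Int) - t) ≤ pvWin k := by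
  intro mm
  induction mm using Nat.strong_induction_on with
  | _ mm ih =>
    intro t ht hmm
    by_cases h5 : k - t ≤ 5
    · have e : ((k : Int) - t) = ((k - t : Nat) : Int) := by omega
      have hw : pvW k (k - t) = pvF t := by
        unfold pvW
        rw [if_pos (by omega)]
        congr 1
        omega
      rw [e, ← hw]
      exact pvWin_ge_w k (k - t) (by omega) h5
    · -- multiplier ≥ 6: dominated by break point t+3, multiplier (k-t)-3
      have hd := pvF_double t
      have h1 := pvF_ge_one t
      have step : pvF t * ((k : Int) - t) ≤ pvF (t + 3) * ((k : Int) - (t + 3 : Nat)) := by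
        have e3 : ((k : Int) - (t + 3 : Nat)) = ((k : Int) - t) - 3 := by push_cast; ring
        rw [e3]
        have hM : (6 : Int) ≤ (k : Int) - t := by omega
        nlinarith [hd, h1, hM]
      refine le_trans step (ih (mm - 3) (by omega) (t + 3) (by omega) (by omega))

lemma pvWindow (k : Nat) : pvF (k + 1) = pvWin k := by
  apply le_antisymm
  · rw [pvF_succ]
    apply pvFoldMax_le
    · exact le_max_of_le_left (le_max_of_le_left (le_max_of_le_left (le_max_left _ _)))
    · intro t ht
      exact pvCand_le k (k - t) t (List.mem_range.mp ht) rfl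
  · unfold pvWin
    have base : pvF k + 1 ≤ pvF (k + 1) := pvF_succ_ge k
    have hterm : ∀ m, 2 ≤ m → m ≤ 5 → pvW k m * m ≤ pvF (k + 1) := by
      intro m h2 h5
      by_cases hk : m ≤ k
      · have ht : k - m < k - 1 := by omega
        have h := (PySem.List.le_foldl_max_int (List.range (k - 1))
          (fun t => pvF t * ((k : Int) - t)) (pvF k + 1)).2 (k - m) (List.mem_range.mpr ht)
        rw [← pvF_succ] at h
        have e : ((k : Int) - ((k - m : Nat) : Int)) = (m : Int) := by omega
        rw [e] at h
        unfold pvW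
        rw [if_pos hk]
        exact h
      · unfold pvW
        rw [if_neg hk]
        have := pvF_ge_one (k + 1)
        simp
        omega
    exact max_le (max_le (max_le (max_le base (hterm 2 (by omega) (by omega)))
      (hterm 3 (by omega) (by omega))) (hterm 4 (by omega) (by omega))) (hterm 5 (by omega) (by omega))

lemma pvInner (i : Int) (js : List Int) :
    ∀ (l rest : List Int) (acc : Int), i = l.length → (∀ j ∈ js, 3 ≤ j ∧ j ≤ i) →
    js.foldl
      (fun dp j =>
        let max_value := PySem.List.pyGetD dp (j - 3) 0 * (i - j + 2)
        PySem.List.pySetD dp i (max (PySem.List.pyGetD dp i 0) max_value))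
      (l ++ acc :: rest)
    = l ++ (js.foldl (fun a j => max a (PySem.List.pyGetD l (j - 3) 0 * (i - j + 2))) acc) :: rest := by
  induction js with
  | nil => intro l rest acc _ _; rfl
  | cons j js ih =>
      intro l rest acc hi hjs
      obtain ⟨h3, hji⟩ := hjs j (by simp)
      have hget_i : PySem.List.pyGetD (l ++ acc :: rest) i 0 = acc := by
        rw [hi, PySem.List.pyGetD_natCast]
        simp [List.getD_eq_getElem?_getD]
      have hget_j : PySem.List.pyGetD (l ++ acc :: rest) (j - 3) 0 = PySem.List.pyGetD l (j - 3) 0 := by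
        have h0 : (0 : Int) ≤ j - 3 := by omega
        have hlt : j - 3 < (l.length : Int) := by omega
        have htn : (j - 3).toNat < l.length := by omega
        rw [PySem.List.pyGetD_eq_getElem _ _ h0 (by simp; omega),
            PySem.List.pyGetD_eq_getElem _ _ h0 hlt]
        exact List.getElem_append_left htn
      have hset : ∀ v : Int, PySem.List.pySetD (l ++ acc :: rest) i v = l ++ v :: rest := by
        intro v
        rw [hi, PySem.List.pySetD_natCast, List.set_append_right _ _ (le_refl _)]
        simp
      simp only [List.foldl_cons, hget_i, hget_j, hset]
      exact ih l rest _ hi (fun x hx => hjs x (by simp [hx]))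

-- the outer invariant: after the iterations i = 1 .. m the table is pvL m padded with zeros
lemma pvOuter (n : Nat) (hn : 1 ≤ n) : ∀ (m : Nat), m ≤ n - 1 →
    (PySem.List.pyRange 1 (1 + (m : Int)) 1).foldl
      (fun dp i =>
        List.foldl
          (fun dp j =>
            PySem.List.pySetD dp i
              (max (PySem.List.pyGetD dp i 0) (PySem.List.pyGetD dp (j - 3) 0 * (i - j + 2))))
          (PySem.List.pySetD dp i (PySem.List.pyGetD dp (i - 1) 0 + 1))
          (PySem.List.pyRange 3 (i + 1) 1))
      (pvL 0 ++ List.replicate (n - 1) 0)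
    = pvL m ++ List.replicate (n - 1 - m) 0 := by
  intro m
  induction m with
  | zero => intro _; rw [PySem.List.pyRange_one_eq_nil (by omega)]; simp
  | succ m ih =>
      intro hm
      have hsplit : PySem.List.pyRange 1 (1 + ((m + 1 : Nat) : Int)) 1
          = PySem.List.pyRange 1 (1 + (m : Int)) 1 ++ [1 + (m : Int)] := by
        rw [show (1 + ((m + 1 : Nat) : Int)) = (1 + (m : Int)) + 1 by push_cast; ring]
        exact PySem.List.pyRange_one_succ_right (by omega)
      rw [hsplit, List.foldl_append, ih (by omega)]
      simp only [List.foldl_cons, List.foldl_nil]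
      have hrep : List.replicate (n - 1 - m) (0 : Int) = 0 :: List.replicate (n - 2 - m) 0 := by
        rw [show n - 1 - m = (n - 2 - m) + 1 by omega]
        rfl
      have hi : (1 + (m : Int)) = ((pvL m).length : Int) := by rw [pvL_length]; push_cast; ring
      have hget : PySem.List.pyGetD (pvL m ++ List.replicate (n - 1 - m) 0) (1 + (m : Int) - 1) 0 = pvF m := by
        have e : (1 + (m : Int) - 1) = ((m : Nat) : Int) := by ring
        rw [e, PySem.List.pyGetD_natCast, List.getD_append _ _ _ _ (by rw [pvL_length]; omega)]
        exact pvL_getD m m (le_refl m)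
      have hset : PySem.List.pySetD (pvL m ++ List.replicate (n - 1 - m) 0) (1 + (m : Int)) (pvF m + 1)
          = pvL m ++ (pvF m + 1) :: List.replicate (n - 2 - m) 0 := by
        rw [hrep, hi, PySem.List.pySetD_natCast, List.set_append_right _ _ (le_refl _)]
        simp
      rw [hget, hset]
      rw [pvInner _ _ (pvL m) _ _ hi
        (fun j hj => by have := (PySem.List.mem_pyRange_one).mp hj; omega)]
      have hval : (PySem.List.pyRange 3 (1 + (m : Int) + 1) 1).foldl
          (fun a j => max a (PySem.List.pyGetD (pvL m) (j - 3) 0 * (1 + (m : Int) - j + 2))) (pvF m + 1)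
          = pvNewval (pvL m) := by
        unfold pvNewval
        dsimp only
        rw [← hi]
        congr 1
        rw [show (1 + (m : Int) - 1) = ((m : Nat) : Int) by ring,
          PySem.List.pyGetD_natCast, pvL_getD m m (le_refl m)]
      rw [hval]
      rw [show pvL (m + 1) = pvL m ++ [pvNewval (pvL m)] from rfl]
      simp [show n - 1 - (m + 1) = n - 2 - m by omega]

lemma pvA_eq (N : Int) (h : 1 ≤ N) : maxA2 N = pvF (N - 1).toNat := by
  unfold maxA2
  dsimp only
  set n := N.toNat with hn
  have hn1 : 1 ≤ n := by omega
  have hinit : PySem.List.pySetD (List.replicate n (0 : Int)) 0 1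
      = pvL 0 ++ List.replicate (n - 1) 0 := by
    rw [show (0 : Int) = ((0 : Nat) : Int) from rfl, PySem.List.pySetD_natCast,
      show n = (n - 1) + 1 by omega]
    rfl
  rw [hinit]
  rw [show N = 1 + (((N - 1).toNat : Nat) : Int) by omega]
  rw [pvOuter n hn1 (N - 1).toNat (by omega)]
  rw [show n - 1 - (N - 1).toNat = 0 by omega]
  rw [show (1 + (((N - 1).toNat : Nat) : Int) - 1) = (((N - 1).toNat : Nat) : Int) by ring]
  rw [PySem.List.pyGetD_natCast]
  simp only [List.replicate, List.append_nil]
  rw [Int.toNat_natCast]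
  exact pvL_getD _ _ (le_refl _)

def pvStep (s : Int × Int × Int × Int × Int × Int) : Int × Int × Int × Int × Int × Int :=
  match s with
  | (a, b, c, d, e, f) =>
    let cur := max (max (max (max (f + 1) (d * 2)) (c * 3)) (b * 4)) (a * 5)
    (b, c, d, e, f, cur)

lemma pvFoldl_const {α β : Type} (F : β → β) (l : List α) (i : β) :
    l.foldl (fun s _ => F s) i = F^[l.length] i := by
  induction l generalizing i with
  | nil => rfl
  | cons x xs ih => simp [List.foldl_cons, ih, Function.iterate_succ_apply]

lemma pvW_succ (k d : Nat) : pvW (k + 1) (d + 1) = pvW k d := by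
  unfold pvW
  by_cases h : d ≤ k
  · rw [if_pos (by omega), if_pos h, Nat.succ_sub_succ]
  · rw [if_neg (by omega), if_neg (by omega)]

lemma pvW_zero (k : Nat) : pvW k 0 = pvF k := by simp [pvW]

lemma pvStep_iter (k : Nat) :
    pvStep^[k] (0, 0, 0, 0, 0, 1) = (pvW k 5, pvW k 4, pvW k 3, pvW k 2, pvW k 1, pvW k 0) := by
  induction k with
  | zero => simp [pvW, pvF, pvL]
  | succ k ih =>
      rw [Function.iterate_succ_apply', ih]
      show (pvW k 4, pvW k 3, pvW k 2, pvW k 1, pvW k 0,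
          max (max (max (max (pvW k 0 + 1) (pvW k 2 * 2)) (pvW k 3 * 3)) (pvW k 4 * 4)) (pvW k 5 * 5)) = _
      rw [pvW_zero]
      rw [show max (max (max (max (pvF k + 1) (pvW k 2 * 2)) (pvW k 3 * 3)) (pvW k 4 * 4)) (pvW k 5 * 5)
          = pvWin k from rfl, ← pvWindow]
      rw [show pvF (k + 1) = pvW (k + 1) 0 from (pvW_zero (k + 1)).symm]
      rw [← pvW_succ k 4, ← pvW_succ k 3, ← pvW_succ k 2, ← pvW_succ k 1]
      have h1 : pvF k = pvW (k + 1) 1 := by rw [pvW_succ, pvW_zero]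
      rw [h1]

lemma pvB_eq (N : Int) (_ : 1 ≤ N) : maxA2_alt N = pvF (N - 1).toNat := by
  unfold maxA2_alt
  rw [show (fun (s : Int × Int × Int × Int × Int × Int) (_ : Int) =>
      match s with
      | (a, b, c, d, e, f) =>
        let cur := max (max (max (max (f + 1) (d * 2)) (c * 3)) (b * 4)) (a * 5)
        (b, c, d, e, f, cur)) = (fun s _ => pvStep s) from rfl]
  rw [pvFoldl_const, PySem.List.length_pyRange_one, pvStep_iter]
  exact pvW_zero _

-- ===== VERDICT (by name: the statement is the Claim_ definition above) =====
theorem maxA2_spec : Claim_equal_maxA2 := by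
  intro N _ hpre
  unfold Spec_maxA2
  rw [pvA_eq N hpre, pvB_eq N hpre]
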